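-- pv_equiv track=rewrite | github.com/jk960903/StudyWith | Simbean/python/programmers/p64064 불량 사용자.py | search_banned
-- ===== SOURCE A (Python) =====
-- def search_banned(user_id, banned_id):
--     hash_table = [[] for i in range(len(banned_id))]
--     for idx, i in enumerate(banned_id):
--         for idx2, j in enumerate(user_id):
--             flag = 0
--             if len(i) != len(j):
--                 continue
--             for c_i, c_j in zip(i, j):
--                 if c_i != '*':
--                     if c_i != c_j:
--                         flag = 1
--             if flag == 0:
--                 hash_table[idx].append(idx2)
--     return hash_table
-- ===== SOURCE B (Python) =====
-- def search_banned(user_id, banned_id):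
--     # Index users by length once; each pattern only scans its own length bucket.
--     by_len = {}
--     for idx, u in enumerate(user_id):
--         by_len.setdefault(len(u), []).append((idx, u))
--     return [
--         [idx for idx, u in by_len.get(len(p), [])
--          if all(c == '*' or c == d for c, d in zip(p, u))]
--         for p in banned_id
--     ]
-- ===== Notes on version B (the rewrite author's own statement) =====
-- stated objective: alternative
-- what changed: B builds a length-indexed dictionary of (index,user) pairs in one pass and, per banned pattern, filters only the bucket of its length with an all()-based wildcard test, instead of A's pre-sized table mutated by a triple nested loop with an integer flag.
import Mathlib
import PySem

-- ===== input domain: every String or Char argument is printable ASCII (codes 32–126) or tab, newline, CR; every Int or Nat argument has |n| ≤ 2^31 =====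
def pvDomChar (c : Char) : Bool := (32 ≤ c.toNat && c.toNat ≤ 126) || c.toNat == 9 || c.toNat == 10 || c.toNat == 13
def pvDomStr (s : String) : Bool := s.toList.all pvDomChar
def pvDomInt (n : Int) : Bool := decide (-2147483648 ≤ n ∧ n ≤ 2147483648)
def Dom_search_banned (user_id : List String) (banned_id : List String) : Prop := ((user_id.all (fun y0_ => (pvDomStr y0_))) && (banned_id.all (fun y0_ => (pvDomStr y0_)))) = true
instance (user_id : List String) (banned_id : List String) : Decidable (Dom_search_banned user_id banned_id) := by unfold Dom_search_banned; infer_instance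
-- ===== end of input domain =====

-- B replaces A's triple nested loop over a pre-sized mutable table by a one-pass
-- length-indexed dictionary of (index, user) pairs, filtered per pattern (objective: alternative).

-- ===== PORT A =====
def search_banned (user_id : List String) (banned_id : List String) : List (List Int) :=
  let hash_table : List (List Int) :=
    (PySem.List.pyRange 0 (PySem.List.len banned_id) 1).map (fun _ => ([] : List Int))
  (PySem.List.enumerate banned_id).foldl (fun ht p =>
    (PySem.List.enumerate user_id).foldl (fun ht2 q =>
      if PySem.Str.len p.2 ≠ PySem.Str.len q.2 then ht2
      else
        let flag : Int := (List.zip p.2.toList q.2.toList).foldl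
          (fun f cc => if cc.1 ≠ '*' then (if cc.1 ≠ cc.2 then (1 : Int) else f) else f) 0
        if flag = 0 then ht2.modify p.1.toNat (fun l => l ++ [q.1]) else ht2) ht) hash_table

-- ===== PORT B =====
def matchesPat (p u : String) : Bool :=
  (List.zip p.toList u.toList).all (fun cd => cd.1 == '*' || cd.1 == cd.2)

def search_banned_alt (user_id : List String) (banned_id : List String) : List (List Int) :=
  let by_len : PySem.Dict Int (List (Int × String)) :=
    (PySem.List.enumerate user_id).foldl
      (fun d q => d.modify (PySem.Str.len q.2) [] (fun l => l ++ [q])) PySem.Dict.empty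
  banned_id.map (fun p =>
    ((by_len.getD (PySem.Str.len p) []).filter (fun q => matchesPat p q.2)).map (fun q => q.1))

-- ===== PRECONDITION & SPEC =====
def Spec_search_banned (user_id : List String) (banned_id : List String) (out : List (List Int)) : Prop := out = search_banned_alt user_id banned_id
instance (user_id : List String) (banned_id : List String) (out : List (List Int)) : Decidable (Spec_search_banned user_id banned_id out) := by unfold Spec_search_banned; infer_instance

-- ===== CLAIM (what is proved, stated in full; the proofs are below) =====
def Claim_equal_search_banned : Prop := ∀ (user_id : List String) (banned_id : List String), Dom_search_banned user_id banned_id → Spec_search_banned user_id banned_id (search_banned user_id banned_id)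

-- ===== LEMMAS AND PROOFS =====

-- the per-pattern matched index list (reference form both sides are reduced to)
def matchList (user_id : List String) (p : String) : List Int :=
  (((PySem.List.enumerate user_id).filter (fun q => PySem.Str.len q.2 == PySem.Str.len p)).filter
    (fun q => matchesPat p q.2)).map (fun q => q.1)

theorem modify_modify {a : Type} (l : List a) (k : Nat) (f g : a -> a) :
    (l.modify k f).modify k g = l.modify k (fun x => g (f x)) := by
  apply List.ext_getElem?
  intro j
  simp only [List.getElem?_modify]
  cases l[j]? <;> simp <;> split <;> simp

theorem modify_append {a : Type} (A : List a) (b : a) (B : List a) (f : a -> a) :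
    (A ++ b :: B).modify A.length f = A ++ f b :: B := by
  apply List.ext_getElem?
  intro j
  rw [List.getElem?_modify]
  rcases lt_trichotomy j A.length with h | h | h
  · rw [List.getElem?_append_left h, List.getElem?_append_left h]
    cases hx : A[j]? <;> simp [hx, Nat.ne_of_gt h]
  · subst h
    rw [List.getElem?_append_right (le_refl _), List.getElem?_append_right (le_refl _)]
    simp
  · have h1 : A.length ≤ j := by omega
    obtain ⟨m, hm⟩ : ∃ m, j - A.length = m + 1 := ⟨j - A.length - 1, by omega⟩
    rw [List.getElem?_append_right h1, List.getElem?_append_right h1, hm]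
    cases hx : B[m]?
    · simp [hx]
    · simp [hx]
      exact fun hj => absurd hj (Nat.ne_of_lt h)

-- A's flag loop computes the negation of matchesPat
theorem modify_id_fun {a : Type} (l : List a) (k : Nat) : (l.modify k fun x => x) = l := by
  apply List.ext_getElem?
  intro j
  rw [List.getElem?_modify]
  cases hx : l[j]? <;> simp [hx]

theorem flag_foldl (z : List (Char × Char)) (f : Int) :
    z.foldl (fun f cc => if cc.1 ≠ '*' then (if cc.1 ≠ cc.2 then (1 : Int) else f) else f) f
      = (if z.all (fun cd => cd.1 == '*' || cd.1 == cd.2) then f else 1) := by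
  induction z generalizing f with
  | nil => simp
  | cons cd z ih =>
    simp only [List.foldl_cons, List.all_cons, ih]
    by_cases h1 : cd.1 = '*' <;> by_cases h2 : cd.1 = cd.2 <;>
      simp [h1, h2]

theorem flag_eq (p u : String) :
    (List.zip p.toList u.toList).foldl
        (fun f cc => if cc.1 ≠ '*' then (if cc.1 ≠ cc.2 then (1 : Int) else f) else f) 0
      = (if matchesPat p u then 0 else 1) := by
  rw [flag_foldl]
  rfl

-- A's inner loop over users appends the matching indices at slot k
theorem inner_foldl (p : String) (L : List (Int × String)) (k : Nat) (ht : List (List Int)) :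
    L.foldl (fun ht2 q =>
      if PySem.Str.len p ≠ PySem.Str.len q.2 then ht2
      else
        let flag : Int := (List.zip p.toList q.2.toList).foldl
          (fun f cc => if cc.1 ≠ '*' then (if cc.1 ≠ cc.2 then (1 : Int) else f) else f) 0
        if flag = 0 then ht2.modify k (fun l => l ++ [q.1]) else ht2) ht
    = ht.modify k (fun l => l ++
        ((L.filter (fun q => PySem.Str.len q.2 == PySem.Str.len p)).filter
          (fun q => matchesPat p q.2)).map (fun q => q.1)) := by
  induction L generalizing ht with
  | nil =>
    simp only [List.foldl_nil, List.filter_nil, List.map_nil]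
    have h1 : (fun l : List Int => l ++ ([] : List Int)) = fun l => l :=
      funext fun l => List.append_nil l
    rw [h1, modify_id_fun]
  | cons q L ih =>
    simp only [flag_eq] at ih
    simp only [List.foldl_cons, flag_eq]
    by_cases hl : PySem.Str.len p = PySem.Str.len q.2
    · have hb : (PySem.Str.len q.2 == PySem.Str.len p) := beq_iff_eq.mpr hl.symm
      rw [if_neg (fun h => h hl)]
      by_cases hm : matchesPat p q.2
      · rw [if_pos (by simp [hm]), ih, modify_modify,
            List.filter_cons, if_pos hb, List.filter_cons, if_pos hm, List.map_cons]
        congr 1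
        funext x
        simp
      · rw [if_neg (by simp [hm]), ih,
            List.filter_cons, if_pos hb, List.filter_cons, if_neg hm]
    · rw [if_pos hl, ih, List.filter_cons,
          if_neg (fun h => hl (eq_of_beq h).symm)]

-- the outer loop: enumerate-indexed modifies fill consecutive slots
theorem outer_foldl (user_id : List String) (bl : List String)
    (A B : List (List Int)) (hlen : bl.length ≤ B.length) :
    (PySem.List.enumerate bl (A.length : Int)).foldl (fun ht p =>
      (PySem.List.enumerate user_id).foldl (fun ht2 q =>
        if PySem.Str.len p.2 ≠ PySem.Str.len q.2 then ht2
        else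
          let flag : Int := (List.zip p.2.toList q.2.toList).foldl
            (fun f cc => if cc.1 ≠ '*' then (if cc.1 ≠ cc.2 then (1 : Int) else f) else f) 0
          if flag = 0 then ht2.modify p.1.toNat (fun l => l ++ [q.1]) else ht2) ht) (A ++ B)
    = A ++ (List.zipWith (fun p b => b ++ matchList user_id p) bl B ++ B.drop bl.length) := by
  simp only [matchList]
  induction bl generalizing A B with
  | nil => simp [PySem.List.enumerate]
  | cons p bl ih =>
    cases B with
    | nil => simp at hlen
    | cons b B' =>
      rw [PySem.List.enumerate_cons]
      simp only [List.foldl_cons]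
      rw [inner_foldl]
      rw [show ((A.length : Int)).toNat = A.length from Int.toNat_natCast _]
      rw [modify_append]
      set w : List Int := b ++
          (((PySem.List.enumerate user_id).filter
              (fun q => PySem.Str.len q.2 == PySem.Str.len p)).filter
            (fun q => matchesPat p q.2)).map (fun q => q.1) with hw
      rw [List.append_cons A w]
      have hc : ((A.length : Int) + 1) = (((A ++ [w]).length : Nat) : Int) := by
        simp
      rw [hc, ih (A ++ [w]) B' (by simpa using hlen)]
      simp [List.append_assoc, hw]

-- the dictionary bucket for key K collects exactly the pairs of that length
theorem dict_bucket (L : List (Int × String)) (d : PySem.Dict Int (List (Int × String))) (K : Int) :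
    (L.foldl (fun d q => d.modify (PySem.Str.len q.2) [] (fun l => l ++ [q])) d).getD K []
      = d.getD K [] ++ L.filter (fun q => PySem.Str.len q.2 == K) := by
  induction L generalizing d with
  | nil => simp
  | cons q L ih =>
    simp only [List.foldl_cons]
    rw [ih]
    by_cases hk : K = PySem.Str.len q.2
    · subst hk
      rw [PySem.Dict.getD_modify_self, List.filter_cons, if_pos (by simp)]
      simp
    · rw [PySem.Dict.getD_modify_of_ne _ _ _ hk, List.filter_cons,
          if_neg (fun h => hk (eq_of_beq h).symm)]

theorem zipWith_rep (m : String -> List Int) (l : List String) :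
    List.zipWith (fun p b => b ++ m p) l (List.replicate l.length ([] : List Int)) = l.map m := by
  induction l with
  | nil => simp
  | cons p l ih => simp [List.replicate_succ, ih]

theorem alt_eq_map (user_id : List String) (banned_id : List String) :
    search_banned_alt user_id banned_id = banned_id.map (matchList user_id) := by
  simp only [search_banned_alt]
  refine List.map_congr_left ?_
  intro p _
  rw [dict_bucket]
  simp [matchList, PySem.Dict.getD, PySem.Dict.get?, PySem.Dict.empty]

theorem a_eq_map (user_id : List String) (banned_id : List String) :
    search_banned user_id banned_id = banned_id.map (matchList user_id) := by
  simp only [search_banned]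
  have h0 : (PySem.List.pyRange 0 (PySem.List.len banned_id) 1).map
      (fun _ => ([] : List Int)) = List.replicate banned_id.length [] := by
    rw [List.map_const']
    simp [PySem.List.length_pyRange_one]
  rw [h0]
  have := outer_foldl user_id banned_id [] (List.replicate banned_id.length []) (by simp)
  simp only [List.length_nil, Nat.cast_zero, List.nil_append] at this
  rw [this, zipWith_rep]
  simp

-- ===== VERDICT (by name: the statement is the Claim_ definition above) =====
theorem search_banned_spec : Claim_equal_search_banned := by
  intro user_id banned_id _
  show _ = _
  rw [a_eq_map, alt_eq_map]
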